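-- pv_equiv track=rewrite | github.com/collinsakenga/codewars_solutions | 5 kyu/Simple Fun 155 PacMan.py | pac_man
-- ===== SOURCE A (Python) =====
-- from collections import deque
--
-- def pac_man(N, PM, enemies):
--     if not enemies:
--         return N**2-1
--     memo=set()
--     res=deque([(PM[0], PM[1])])
--     total=-1
--     limity=set(i[0] for i in enemies)
--     limitx=set(i[1] for i in enemies)
--     while res:
--         y, x=res.popleft()
--         if (y, x) in memo or y in limity or x in limitx:
--             continue
--         memo.add((y, x))
--         total+=1
--         for i,j in ((0, 1), (0, -1), (1, 0), (-1, 0)):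
--             y2, x2=y+i, x+j
--             if 0<=y2<N and 0<=x2<N and y2 not in limity and x2 not in limitx and (y2, x2) not in memo:
--                 res.append((y2, x2))
--     return max(total, 0)
-- ===== SOURCE B (Python) =====
-- def pac_man(N, PM, enemies):
--     if not enemies:
--         return N**2 - 1
--     py, px = PM[0], PM[1]
--     if not (0 <= py < N and 0 <= px < N):
--         return 0
--     bottom, top, left, right = 0, N, 0, N
--     for e in enemies:
--         r, c = e[0], e[1]
--         if r == py or c == px:
--             return 0
--         if r < py:
--             bottom = max(bottom, r + 1)
--         else:
--             top = min(top, r)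
--         if c < px:
--             left = max(left, c + 1)
--         else:
--             right = min(right, c)
--     return (top - bottom) * (right - left) - 1
-- ===== Notes on version B (the rewrite author's own statement) =====
-- stated objective: alternative
-- what changed: Replaced the BFS flood fill over up to N^2 cells with one pass over enemies that shrinks the free row-run and column-run around PacMan and multiplies their lengths (enemy rows/columns act as full walls, so the reachable region is a rectangle); intended as asymptotically faster in N, but a timing run grows |enemies|, so no speed is claimed.
-- intended difference: When PacMan stands exactly one step outside the board and its row, its column, and the adjacent board cell's row and column are all enemy-free, A floods the board from that adjacent cell and returns the area of its free rectangle, while B returns 0, the intended count since an off-board PacMan can reach no cell. — e.g. on pac_man(2, [-1, 0], [[1, 1]]): A returns 1, B returns 0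
import Mathlib
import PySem

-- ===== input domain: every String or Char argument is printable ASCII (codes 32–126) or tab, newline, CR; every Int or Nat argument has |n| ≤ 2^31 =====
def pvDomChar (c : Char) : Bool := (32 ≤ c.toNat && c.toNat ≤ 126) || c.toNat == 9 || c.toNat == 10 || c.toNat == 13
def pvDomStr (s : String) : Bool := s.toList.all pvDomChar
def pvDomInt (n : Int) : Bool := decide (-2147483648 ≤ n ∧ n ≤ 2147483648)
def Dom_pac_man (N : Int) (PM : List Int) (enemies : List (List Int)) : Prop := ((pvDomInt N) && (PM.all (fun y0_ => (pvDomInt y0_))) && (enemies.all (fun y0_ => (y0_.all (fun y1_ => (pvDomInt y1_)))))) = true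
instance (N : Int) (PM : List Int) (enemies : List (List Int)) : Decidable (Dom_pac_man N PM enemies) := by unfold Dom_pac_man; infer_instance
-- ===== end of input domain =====

-- B replaces A's BFS flood fill by one pass over enemies that shrinks the free
-- row/column runs around PacMan and multiplies them (objective: alternative); on an
-- off-board PacMan one step outside a free board edge B returns 0 where A floods the
-- board (stated as the intended difference D_ below).

-- ===== PORT A =====
-- neighbour admission test of A's inner loop (bounds, free row/col, not yet visited)
def pacNbrOk (N : Int) (limity limitx : PySem.Set Int) (memo : PySem.Set (Int × Int))
    (q : Int × Int) : Bool :=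
  decide (0 ≤ q.1) && decide (q.1 < N) && decide (0 ≤ q.2) && decide (q.2 < N) &&
  !(PySem.Set.contains limity q.1) && !(PySem.Set.contains limitx q.2) &&
  !(PySem.Set.contains memo q)

-- A's 'while res:' loop; the fuel only makes the recursion total (it is proved sufficient)
def pacLoop (N : Int) (limity limitx : PySem.Set Int) :
    Nat → List (Int × Int) → PySem.Set (Int × Int) → Int → Int
  | 0, _, _, total => total
  | _ + 1, [], _, total => total
  | fuel + 1, (y, x) :: rest, memo, total =>
    if PySem.Set.contains memo (y, x) || PySem.Set.contains limity y ||
        PySem.Set.contains limitx x then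
      pacLoop N limity limitx fuel rest memo total
    else
      let memo' := PySem.Set.add memo (y, x)
      pacLoop N limity limitx fuel
        (rest ++ ([(y, x + 1), (y, x - 1), (y + 1, x), (y - 1, x)].filter
          (pacNbrOk N limity limitx memo')))
        memo' (total + 1)

def pac_man (N : Int) (PM : List Int) (enemies : List (List Int)) : Int :=
  if enemies = [] then N ^ 2 - 1
  else
    let limity : PySem.Set Int :=
      PySem.Set.ofList (enemies.map (fun i => PySem.List.pyGetD i 0 0))
    let limitx : PySem.Set Int :=
      PySem.Set.ofList (enemies.map (fun i => PySem.List.pyGetD i 1 0))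
    max (pacLoop N limity limitx (4 * (N.toNat * N.toNat + 1) + 2)
      [(PySem.List.pyGetD PM 0 0, PySem.List.pyGetD PM 1 0)] PySem.Set.empty (-1)) 0

-- ===== PORT B =====
-- B's loop body: the Bool is the early 'return 0' of Source B (state frozen once set);
-- otherwise the enemy shrinks the free row run [bottom, top) and column run [left, right)
def pacStep (py px : Int) (s : Int × Int × Int × Int × Bool) (e : List Int) :
    Int × Int × Int × Int × Bool :=
  if s.2.2.2.2 then s
  else
    let r := PySem.List.pyGetD e 0 0
    let c := PySem.List.pyGetD e 1 0
    if r = py ∨ c = px then (s.1, s.2.1, s.2.2.1, s.2.2.2.1, true)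
    else
      ((if r < py then max s.1 (r + 1) else s.1),
       (if r < py then s.2.1 else min s.2.1 r),
       (if c < px then max s.2.2.1 (c + 1) else s.2.2.1),
       (if c < px then s.2.2.2.1 else min s.2.2.2.1 c),
       false)

def pac_man_alt (N : Int) (PM : List Int) (enemies : List (List Int)) : Int :=
  if enemies = [] then N ^ 2 - 1
  else
    let py := PySem.List.pyGetD PM 0 0
    let px := PySem.List.pyGetD PM 1 0
    if ¬(0 ≤ py ∧ py < N ∧ 0 ≤ px ∧ px < N) then 0
    else
      let s := enemies.foldl (pacStep py px) (0, N, 0, N, false)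
      if s.2.2.2.2 then 0
      else (s.2.1 - s.1) * (s.2.2.2.1 - s.2.2.1) - 1

-- ===== PRECONDITION & SPEC =====
-- Pre_: when enemies is nonempty, PM and every enemy must have at least two
-- coordinates — otherwise Python A raises IndexError on PM[0]/PM[1]/i[0]/i[1].
def Pre_pac_man (N : Int) (PM : List Int) (enemies : List (List Int)) : Prop :=
  enemies = [] ∨ (2 ≤ PM.length ∧ (∀ e ∈ enemies, 2 ≤ e.length))
instance (N : Int) (PM : List Int) (enemies : List (List Int)) :
    Decidable (Pre_pac_man N PM enemies) := by unfold Pre_pac_man; infer_instance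

def pvWitness_pac_man : Int × List Int × List (List Int) := (4, [1, 2], [[3, 0]])

-- D_: PacMan stands exactly one step outside the board and its row, its column, and
-- the adjacent board cell's row and column are all enemy-free; A floods the board from
-- that adjacent cell and returns the area of its free rectangle, B returns 0, the
-- intended count since an off-board PacMan can reach no cell.
def pacIdx (i : Nat) (l : List (List Int)) : List Int := l.map (List.getD · i 0)

-- coordinate p is one step off a board edge, the cross coordinate q is on the board,
-- and p, q and the edge cell's p-coordinate avoid the enemy lists P (p's axis), Q
def pacS (N p q : Int) (P Q : List Int) : Prop :=
  (p = -1 ∨ p = N) ∧ 0 ≤ q ∧ q < N ∧ p ∉ P ∧ q ∉ Q ∧ (if p = -1 then 0 else N - 1) ∉ P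

def D_pac_man (N : Int) (PM : List Int) (enemies : List (List Int)) : Prop :=
  enemies ≠ [] ∧ ∃ i ∈ [0, 1], pacS N (PM.getD i 0) (PM.getD (1 - i) 0)
    (pacIdx i enemies) (pacIdx (1 - i) enemies)
instance (N : Int) (PM : List Int) (enemies : List (List Int)) :
    Decidable (D_pac_man N PM enemies) := by unfold D_pac_man pacS pacIdx; infer_instance

def Spec_pac_man (N : Int) (PM : List Int) (enemies : List (List Int)) (out : Int) : Prop :=
  ¬ D_pac_man N PM enemies → out = pac_man_alt N PM enemies
instance (N : Int) (PM : List Int) (enemies : List (List Int)) (out : Int) :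
    Decidable (Spec_pac_man N PM enemies out) := by unfold Spec_pac_man; infer_instance

def pvDiffWitness_pac_man : Int × List Int × List (List Int) := (2, [-1, 0], [[1, 1]])
def pvDiffWitnessOut_pac_man : Int × Int := (1, 0)

-- ===== CLAIM (what is proved, stated in full; the proofs are below) =====
def Claim_unchanged_pac_man : Prop := ∀ (N : Int) (PM : List Int) (enemies : List (List Int)),
  Dom_pac_man N PM enemies → Pre_pac_man N PM enemies →
  Spec_pac_man N PM enemies (pac_man N PM enemies)

def Claim_changed_pac_man : Prop :=
  Dom_pac_man (pvDiffWitness_pac_man.1) (pvDiffWitness_pac_man.2.1) (pvDiffWitness_pac_man.2.2) ∧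
  Pre_pac_man (pvDiffWitness_pac_man.1) (pvDiffWitness_pac_man.2.1) (pvDiffWitness_pac_man.2.2) ∧
  D_pac_man (pvDiffWitness_pac_man.1) (pvDiffWitness_pac_man.2.1) (pvDiffWitness_pac_man.2.2) ∧
  pac_man (pvDiffWitness_pac_man.1) (pvDiffWitness_pac_man.2.1) (pvDiffWitness_pac_man.2.2) = pvDiffWitnessOut_pac_man.1 ∧
  pac_man_alt (pvDiffWitness_pac_man.1) (pvDiffWitness_pac_man.2.1) (pvDiffWitness_pac_man.2.2) = pvDiffWitnessOut_pac_man.2 ∧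
  pvDiffWitnessOut_pac_man.1 ≠ pvDiffWitnessOut_pac_man.2

def Claim_exact_pac_man : Prop := ∀ (N : Int) (PM : List Int) (enemies : List (List Int)),
  Dom_pac_man N PM enemies → Pre_pac_man N PM enemies → D_pac_man N PM enemies →
  pac_man N PM enemies ≠ pac_man_alt N PM enemies

-- ===== LEMMAS AND PROOFS =====
-- bridge: a Python e[0]/e[1] with default equals List.getD at 0/1
lemma pyGetD_zero' (l : List Int) : PySem.List.pyGetD l 0 0 = l.getD 0 0 := by
  simp only [PySem.List.pyGetD, PySem.List.pyGet?, PySem.List.pyIdx?, List.getD]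
  norm_num
  split_ifs with h
  · simp
  · have h0 : l[0]? = none := by rw [List.getElem?_eq_none_iff]; omega
    simp [h0]

lemma pyGetD_one' (l : List Int) : PySem.List.pyGetD l 1 0 = l.getD 1 0 := by
  simp only [PySem.List.pyGetD, PySem.List.pyGet?, PySem.List.pyIdx?, List.getD]
  norm_num
  split_ifs with h
  · simp
  · have h0 : l[1]? = none := by rw [List.getElem?_eq_none_iff]; omega
    simp [h0]

-- D_ restated over the coordinate lists the ports work with
set_option maxHeartbeats 1000000 in
lemma D_iff (N : Int) (PM : List Int) (enemies : List (List Int)) :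
    D_pac_man N PM enemies ↔
      (enemies ≠ [] ∧
       PySem.List.pyGetD PM 0 0 ∉ enemies.map (fun e => PySem.List.pyGetD e 0 0) ∧
       PySem.List.pyGetD PM 1 0 ∉ enemies.map (fun e => PySem.List.pyGetD e 1 0) ∧
       (((PySem.List.pyGetD PM 0 0 = -1 ∨ PySem.List.pyGetD PM 0 0 = N) ∧
           0 ≤ PySem.List.pyGetD PM 1 0 ∧ PySem.List.pyGetD PM 1 0 < N ∧
           (if PySem.List.pyGetD PM 0 0 = -1 then (0 : Int) else N - 1) ∉
             enemies.map (fun e => PySem.List.pyGetD e 0 0)) ∨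
        ((PySem.List.pyGetD PM 1 0 = -1 ∨ PySem.List.pyGetD PM 1 0 = N) ∧
           0 ≤ PySem.List.pyGetD PM 0 0 ∧ PySem.List.pyGetD PM 0 0 < N ∧
           (if PySem.List.pyGetD PM 1 0 = -1 then (0 : Int) else N - 1) ∉
             enemies.map (fun e => PySem.List.pyGetD e 1 0)))) := by
  have e0 : pacIdx 0 enemies = enemies.map (fun e => PySem.List.pyGetD e 0 0) := by
    unfold pacIdx
    exact List.map_congr_left (fun e _ => (pyGetD_zero' e).symm)
  have e1 : pacIdx 1 enemies = enemies.map (fun e => PySem.List.pyGetD e 1 0) := by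
    unfold pacIdx
    exact List.map_congr_left (fun e _ => (pyGetD_one' e).symm)
  have p0 : PM.getD 0 0 = PySem.List.pyGetD PM 0 0 := (pyGetD_zero' PM).symm
  have p1 : PM.getD 1 0 = PySem.List.pyGetD PM 1 0 := (pyGetD_one' PM).symm
  unfold D_pac_man
  have hex : (∃ i ∈ ([0, 1] : List Nat), pacS N (PM.getD i 0) (PM.getD (1 - i) 0)
      (pacIdx i enemies) (pacIdx (1 - i) enemies)) ↔
      (pacS N (PM.getD 0 0) (PM.getD 1 0) (pacIdx 0 enemies) (pacIdx 1 enemies) ∨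
       pacS N (PM.getD 1 0) (PM.getD 0 0) (pacIdx 1 enemies) (pacIdx 0 enemies)) := by
    constructor
    · rintro ⟨i, hi, hS⟩
      simp only [List.mem_cons, List.not_mem_nil, or_false] at hi
      rcases hi with hi | hi <;> subst hi
      · left; exact hS
      · right; exact hS
    · rintro (h | h)
      · exact ⟨0, by simp, h⟩
      · exact ⟨1, by simp, h⟩
  rw [hex, e0, e1, p0, p1]
  unfold pacS
  tauto

-- the open rectangle (lo,hi) × (lo',hi') of cells reachable by A's flood fill
def inR (lo hi lo' hi' : Int) (p : Int × Int) : Prop :=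
  lo < p.1 ∧ p.1 < hi ∧ lo' < p.2 ∧ p.2 < hi'

def rectK (lo hi lo' hi' : Int) : Nat := (hi - lo - 1).toNat * (hi' - lo' - 1).toNat

def nbrs (p : Int × Int) : List (Int × Int) :=
  [(p.1, p.2 + 1), (p.1, p.2 - 1), (p.1 + 1, p.2), (p.1 - 1, p.2)]

-- BFS loop invariant; g holds the "ghost" cells: already-visited cells outside the
-- rectangle (the off-board start), (ay, ax) is an anchor cell of the rectangle
def InvP (ay ax lo hi lo' hi' : Int) (g memo res : List (Int × Int)) (total : Int) : Prop :=
  memo.Nodup ∧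
  (∀ p ∈ memo, inR lo hi lo' hi' p ∨ p ∈ g) ∧
  (∀ p ∈ res, inR lo hi lo' hi' p) ∧
  ((ay, ax) ∈ memo ∨ (ay, ax) ∈ res) ∧
  (∀ p ∈ g, p ∈ memo) ∧
  total = (memo.length : Int) - 1 ∧
  (∀ p ∈ memo, ∀ q ∈ nbrs p, inR lo hi lo' hi' q → q ∈ memo ∨ q ∈ res)

def muP (lo hi lo' hi' : Int) (g memo res : List (Int × Int)) : Nat :=
  4 * (rectK lo hi lo' hi' + g.length - memo.length) + res.length

lemma memo_card_le (lo hi lo' hi' : Int) (g memo : List (Int × Int))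
    (hnd : memo.Nodup) (hsub : ∀ p ∈ memo, inR lo hi lo' hi' p ∨ p ∈ g) :
    memo.length ≤ rectK lo hi lo' hi' + g.length := by
  classical
  have hsub' : memo.toFinset ⊆
      ((Finset.Icc (lo + 1) (hi - 1)) ×ˢ (Finset.Icc (lo' + 1) (hi' - 1))) ∪ g.toFinset := by
    intro p hp
    rw [List.mem_toFinset] at hp
    rcases hsub p hp with ⟨a, b, c, d⟩ | h
    · apply Finset.mem_union_left
      simp only [Finset.mem_product, Finset.mem_Icc]
      omega
    · exact Finset.mem_union_right _ (List.mem_toFinset.mpr h)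
  have h1 : memo.toFinset.card = memo.length := List.toFinset_card_of_nodup hnd
  have h2 := Finset.card_le_card hsub'
  have h3 := Finset.card_union_le
    ((Finset.Icc (lo + 1) (hi - 1)) ×ˢ (Finset.Icc (lo' + 1) (hi' - 1))) g.toFinset
  have h4 : g.toFinset.card ≤ g.length := g.toFinset_card_le
  rw [Finset.card_product, Int.card_Icc, Int.card_Icc] at h3
  have e1 : hi - 1 + 1 - (lo + 1) = hi - lo - 1 := by ring
  have e2 : hi' - 1 + 1 - (lo' + 1) = hi' - lo' - 1 := by ring
  rw [e1, e2] at h3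
  unfold rectK
  omega

-- 1D wall arguments: a free in-bounds coordinate touching a wall stays strictly inside the run
lemma lt_hi_of (hi N v : Int) (ys : List Int) (hw : hi = N ∨ hi ∈ ys)
    (hvh : v ≤ hi) (hvN : v < N) (hfy : v ∉ ys) : v < hi := by
  rcases eq_or_lt_of_le hvh with h | h
  · subst h
    rcases hw with h | h
    · omega
    · exact absurd h hfy
  · exact h

lemma gt_lo_of (lo v : Int) (ys : List Int) (hw : lo = -1 ∨ lo ∈ ys)
    (hvl : lo ≤ v) (hv0 : 0 ≤ v) (hfy : v ∉ ys) : lo < v := by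
  rcases eq_or_lt_of_le hvl with h | h
  · subst h
    rcases hw with h | h
    · omega
    · exact absurd h hfy
  · exact h

-- a neighbour of a rectangle cell that is in-bounds and on a free row/column is in the rectangle
lemma nbr_in_rect (N lo hi lo' hi' : Int) (ys xs : List Int)
    (hwl : lo = -1 ∨ lo ∈ ys) (hwh : hi = N ∨ hi ∈ ys)
    (hwl' : lo' = -1 ∨ lo' ∈ xs) (hwh' : hi' = N ∨ hi' ∈ xs)
    (p q : Int × Int) (hp : inR lo hi lo' hi' p) (hq : q ∈ nbrs p)
    (hb : 0 ≤ q.1 ∧ q.1 < N ∧ 0 ≤ q.2 ∧ q.2 < N) (hfy : q.1 ∉ ys) (hfx : q.2 ∉ xs) :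
    inR lo hi lo' hi' q := by
  obtain ⟨hb1, hb2, hb3, hb4⟩ := hb
  obtain ⟨ha, hbb, hc, hd⟩ := hp
  simp only [nbrs, List.mem_cons, List.not_mem_nil, or_false] at hq
  rcases hq with h | h | h | h <;> subst h <;>
    refine ⟨?_, ?_, ?_, ?_⟩ <;> simp only at hb1 hb2 hb3 hb4 hfy hfx ⊢
  · exact ha
  · exact hbb
  · omega
  · exact lt_hi_of hi' N (p.2 + 1) xs hwh' (by omega) hb4 hfx
  · exact ha
  · exact hbb
  · exact gt_lo_of lo' (p.2 - 1) xs hwl' (by omega) hb3 hfx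
  · omega
  · omega
  · exact lt_hi_of hi N (p.1 + 1) ys hwh (by omega) hb2 hfy
  · exact hc
  · exact hd
  · exact gt_lo_of lo (p.1 - 1) ys hwl (by omega) hb1 hfy
  · omega
  · exact hc
  · exact hd

-- connectivity: a neighbour-closed subset of the rectangle containing the start is all of it
lemma rect_conn (py px lo hi lo' hi' : Int)
    (h1 : lo < py) (h2 : py < hi) (h3 : lo' < px) (h4 : px < hi')
    (memo : List (Int × Int)) (hstart : (py, px) ∈ memo)
    (hclosed : ∀ p ∈ memo, ∀ q ∈ nbrs p, inR lo hi lo' hi' q → q ∈ memo) :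
    ∀ q, inR lo hi lo' hi' q → q ∈ memo := by
  have key : ∀ n : Nat, ∀ q : Int × Int, inR lo hi lo' hi' q →
      (q.1 - py).natAbs + (q.2 - px).natAbs ≤ n → q ∈ memo := by
    intro n
    induction n with
    | zero =>
      intro q hq hd
      have hq' : q = (py, px) := by obtain ⟨y, x⟩ := q; simp only [Prod.mk.injEq]; omega
      rw [hq']; exact hstart
    | succ n ih =>
      intro q hq hd
      obtain ⟨a, b, c, d⟩ := hq
      by_cases hy : q.1 = py
      · by_cases hx : q.2 = px
        · have hq' : q = (py, px) := by obtain ⟨y, x⟩ := q; simp only [Prod.mk.injEq]; exact ⟨hy, hx⟩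
          rw [hq']; exact hstart
        · rcases lt_or_gt_of_ne hx with hlt | hgt
          · have hdist : (q.1 - py).natAbs + (q.2 + 1 - px).natAbs ≤ n := by omega
            have hm := ih (q.1, q.2 + 1) ⟨a, b, by omega, by omega⟩ hdist
            exact hclosed _ hm q
              (by obtain ⟨y, x⟩ := q; simp only [nbrs, List.mem_cons, Prod.mk.injEq,
                List.not_mem_nil, or_false]; norm_num) ⟨a, b, c, d⟩
          · have hdist : (q.1 - py).natAbs + (q.2 - 1 - px).natAbs ≤ n := by omega
            have hm := ih (q.1, q.2 - 1) ⟨a, b, by omega, by omega⟩ hdist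
            exact hclosed _ hm q
              (by obtain ⟨y, x⟩ := q; simp only [nbrs, List.mem_cons, Prod.mk.injEq,
                List.not_mem_nil, or_false]; norm_num) ⟨a, b, c, d⟩
      · rcases lt_or_gt_of_ne hy with hlt | hgt
        · have hdist : (q.1 + 1 - py).natAbs + (q.2 - px).natAbs ≤ n := by omega
          have hm := ih (q.1 + 1, q.2) ⟨by omega, by omega, c, d⟩ hdist
          exact hclosed _ hm q
            (by obtain ⟨y, x⟩ := q; simp only [nbrs, List.mem_cons, Prod.mk.injEq,
              List.not_mem_nil, or_false]; norm_num) ⟨a, b, c, d⟩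
        · have hdist : (q.1 - 1 - py).natAbs + (q.2 - px).natAbs ≤ n := by omega
          have hm := ih (q.1 - 1, q.2) ⟨by omega, by omega, c, d⟩ hdist
          exact hclosed _ hm q
            (by obtain ⟨y, x⟩ := q; simp only [nbrs, List.mem_cons, Prod.mk.injEq,
              List.not_mem_nil, or_false]; norm_num) ⟨a, b, c, d⟩
  intro q hq
  exact key ((q.1 - py).natAbs + (q.2 - px).natAbs) q hq le_rfl

-- main loop lemma: under the invariant, with enough fuel, the loop returns
-- |rectangle| + |ghost cells| - 1
lemma pacLoop_eq (N py px lo hi lo' hi' : Int) (ys xs : List Int)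
    (hlo : -1 ≤ lo) (hhi : hi ≤ N) (h1 : lo < py) (h2 : py < hi)
    (hlo' : -1 ≤ lo') (hhi' : hi' ≤ N) (h3 : lo' < px) (h4 : px < hi')
    (hfreeY : ∀ y, lo < y → y < hi → y ∉ ys)
    (hfreeX : ∀ x, lo' < x → x < hi' → x ∉ xs)
    (hwl : lo = -1 ∨ lo ∈ ys) (hwh : hi = N ∨ hi ∈ ys)
    (hwl' : lo' = -1 ∨ lo' ∈ xs) (hwh' : hi' = N ∨ hi' ∈ xs)
    (g : List (Int × Int)) (hgnd : g.Nodup) (hgout : ∀ p ∈ g, ¬ inR lo hi lo' hi' p) :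
    ∀ fuel (res memo : List (Int × Int)) (total : Int),
      InvP py px lo hi lo' hi' g memo res total →
      muP lo hi lo' hi' g memo res < fuel →
      pacLoop N ys xs fuel res memo total =
        (hi - lo - 1) * (hi' - lo' - 1) + g.length - 1 := by
  intro fuel
  induction fuel with
  | zero => intro res memo total _ hmu; exact absurd hmu (Nat.not_lt_zero _)
  | succ fuel ih =>
    intro res memo total hInv hmu
    obtain ⟨hnd, hmemo, hres, hstart, hgsub, htot, hclosed⟩ := hInv
    cases res with
    | nil =>
      -- loop finished: memo is exactly the rectangle plus the ghost cells
      have hstart' : (py, px) ∈ memo := by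
        rcases hstart with h | h
        · exact h
        · exact absurd h (List.not_mem_nil)
      have hclosed' : ∀ p ∈ memo, ∀ q ∈ nbrs p, inR lo hi lo' hi' q → q ∈ memo := by
        intro p hp q hq hqr
        rcases hclosed p hp q hq hqr with h | h
        · exact h
        · exact absurd h (List.not_mem_nil)
      have hall := rect_conn py px lo hi lo' hi' h1 h2 h3 h4 memo hstart' hclosed'
      have hle := memo_card_le lo hi lo' hi' g memo hnd hmemo
      have hge : rectK lo hi lo' hi' + g.length ≤ memo.length := by
        classical
        have hsubR : (Finset.Icc (lo + 1) (hi - 1)) ×ˢ (Finset.Icc (lo' + 1) (hi' - 1)) ⊆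
            memo.toFinset := by
          intro p hp
          rw [Finset.mem_product, Finset.mem_Icc, Finset.mem_Icc] at hp
          rw [List.mem_toFinset]
          exact hall p ⟨by omega, by omega, by omega, by omega⟩
        have hsubG : g.toFinset ⊆ memo.toFinset := by
          intro p hp
          rw [List.mem_toFinset] at *
          exact hgsub p hp
        have hdisj : Disjoint
            ((Finset.Icc (lo + 1) (hi - 1)) ×ˢ (Finset.Icc (lo' + 1) (hi' - 1)))
            g.toFinset := by
          rw [Finset.disjoint_left]
          intro p hp hpg
          rw [Finset.mem_product, Finset.mem_Icc, Finset.mem_Icc] at hp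
          exact hgout p (List.mem_toFinset.mp hpg) ⟨by omega, by omega, by omega, by omega⟩
        have hc := Finset.card_le_card (Finset.union_subset hsubR hsubG)
        rw [Finset.card_union_of_disjoint hdisj, Finset.card_product, Int.card_Icc,
          Int.card_Icc, List.toFinset_card_of_nodup hnd,
          List.toFinset_card_of_nodup hgnd] at hc
        have e1 : hi - 1 + 1 - (lo + 1) = hi - lo - 1 := by ring
        have e2 : hi' - 1 + 1 - (lo' + 1) = hi' - lo' - 1 := by ring
        rw [e1, e2] at hc
        unfold rectK
        omega
      have hlen : (memo.length : Int) = (hi - lo - 1) * (hi' - lo' - 1) + g.length := by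
        have he : memo.length = rectK lo hi lo' hi' + g.length := le_antisymm hle hge
        rw [he]
        unfold rectK
        push_cast
        rw [Int.toNat_of_nonneg (by omega), Int.toNat_of_nonneg (by omega)]
      show total = _
      omega
    | cons p rest =>
      obtain ⟨y, x⟩ := p
      have hpR : inR lo hi lo' hi' (y, x) := hres (y, x) List.mem_cons_self
      have hyy : PySem.Set.contains ys y = false := by
        rw [← Bool.not_eq_true, PySem.Set.contains_iff]
        exact hfreeY y hpR.1 hpR.2.1
      have hxx : PySem.Set.contains xs x = false := by
        rw [← Bool.not_eq_true, PySem.Set.contains_iff]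
        exact hfreeX x hpR.2.2.1 hpR.2.2.2
      by_cases hm : (y, x) ∈ memo
      · -- already visited: skip
        have hmc : PySem.Set.contains memo (y, x) = true := by
          rw [PySem.Set.contains_iff]; exact hm
        have hstep : pacLoop N ys xs (fuel + 1) ((y, x) :: rest) memo total =
            pacLoop N ys xs fuel rest memo total := by
          simp only [pacLoop, hmc, hyy, hxx, Bool.true_or, if_true]
        rw [hstep]
        refine ih rest memo total ⟨hnd, hmemo, ?_, ?_, hgsub, htot, ?_⟩ ?_
        · intro q hq; exact hres q (List.mem_cons_of_mem _ hq)
        · rcases hstart with h | h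
          · left; exact h
          · rcases List.mem_cons.mp h with h | h
            · left; rw [h]; exact hm
            · right; exact h
        · intro p hp q hq hqr
          rcases hclosed p hp q hq hqr with h | h
          · left; exact h
          · rcases List.mem_cons.mp h with h | h
            · left; rw [h]; exact hm
            · right; exact h
        · unfold muP at hmu ⊢
          simp only [List.length_cons] at hmu
          omega
      · -- new cell: visit it
        have hmc : PySem.Set.contains memo (y, x) = false := by
          rw [← Bool.not_eq_true, PySem.Set.contains_iff]; exact hm
        have hadd : PySem.Set.add memo (y, x) = memo ++ [(y, x)] :=
          PySem.Set.add_of_not_mem hm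
        have hstep : pacLoop N ys xs (fuel + 1) ((y, x) :: rest) memo total =
            pacLoop N ys xs fuel
              (rest ++ ([(y, x + 1), (y, x - 1), (y + 1, x), (y - 1, x)].filter
                (pacNbrOk N ys xs (memo ++ [(y, x)]))))
              (memo ++ [(y, x)]) (total + 1) := by
          simp only [pacLoop, hmc, hyy, hxx, Bool.false_or, hadd]
          norm_num
        rw [hstep]
        set memo' := memo ++ [(y, x)] with hmemo'def
        set flt := ([(y, x + 1), (y, x - 1), (y + 1, x), (y - 1, x)].filter
          (pacNbrOk N ys xs memo')) with hfltdef
        have hnd' : memo'.Nodup := by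
          rw [hmemo'def]
          refine List.Nodup.append hnd (List.nodup_singleton _) ?_
          intro a ha hb
          rw [List.mem_singleton] at hb
          exact hm (hb ▸ ha)
        have hmemo1 : ∀ p ∈ memo', inR lo hi lo' hi' p ∨ p ∈ g := by
          intro p hp
          rcases List.mem_append.mp hp with h | h
          · exact hmemo p h
          · rw [List.mem_singleton] at h; rw [h]; left; exact hpR
        have hmemflt : ∀ q ∈ flt, q ∈ nbrs (y, x) ∧ (0 ≤ q.1 ∧ q.1 < N ∧ 0 ≤ q.2 ∧ q.2 < N) ∧
            q.1 ∉ ys ∧ q.2 ∉ xs ∧ q ∉ memo' := by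
          intro q hq
          rw [hfltdef, List.mem_filter] at hq
          obtain ⟨hq1, hq2⟩ := hq
          unfold pacNbrOk at hq2
          simp only [Bool.and_eq_true, decide_eq_true_eq, Bool.not_eq_true',
            ← Bool.not_eq_true, PySem.Set.contains_iff] at hq2
          exact ⟨hq1, ⟨hq2.1.1.1.1.1.1, hq2.1.1.1.1.1.2, hq2.1.1.1.1.2, hq2.1.1.1.2⟩,
            hq2.1.1.2, hq2.1.2, hq2.2⟩
        have hfltR : ∀ q ∈ flt, inR lo hi lo' hi' q := by
          intro q hq
          obtain ⟨hq1, hb, hfy, hfx, _⟩ := hmemflt q hq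
          exact nbr_in_rect N lo hi lo' hi' ys xs hwl hwh hwl' hwh'
            (y, x) q hpR hq1 hb hfy hfx
        have hres' : ∀ p ∈ rest ++ flt, inR lo hi lo' hi' p := by
          intro q hq
          rcases List.mem_append.mp hq with h | h
          · exact hres q (List.mem_cons_of_mem _ h)
          · exact hfltR q h
        have hstart' : (py, px) ∈ memo' ∨ (py, px) ∈ rest ++ flt := by
          rcases hstart with h | h
          · left; exact List.mem_append.mpr (Or.inl h)
          · rcases List.mem_cons.mp h with h | h
            · left; exact List.mem_append.mpr (Or.inr (by rw [List.mem_singleton, h]))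
            · right; exact List.mem_append.mpr (Or.inl h)
        have hgsub' : ∀ p ∈ g, p ∈ memo' := by
          intro p hp
          exact List.mem_append.mpr (Or.inl (hgsub p hp))
        have htot' : total + 1 = (memo'.length : Int) - 1 := by
          rw [hmemo'def, List.length_append, List.length_singleton]
          push_cast
          omega
        have hclosed' : ∀ p ∈ memo', ∀ q ∈ nbrs p, inR lo hi lo' hi' q →
            q ∈ memo' ∨ q ∈ rest ++ flt := by
          intro p hp q hq hqr
          rcases List.mem_append.mp hp with h | h
          · rcases hclosed p h q hq hqr with h2 | h2
            · left; exact List.mem_append.mpr (Or.inl h2)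
            · rcases List.mem_cons.mp h2 with h2 | h2
              · left; exact List.mem_append.mpr (Or.inr (by rw [List.mem_singleton, h2]))
              · right; exact List.mem_append.mpr (Or.inl h2)
          · rw [List.mem_singleton] at h
            subst h
            by_cases hqm : q ∈ memo'
            · left; exact hqm
            · right
              refine List.mem_append.mpr (Or.inr ?_)
              rw [hfltdef, List.mem_filter]
              refine ⟨hq, ?_⟩
              unfold pacNbrOk
              obtain ⟨r1, r2, r3, r4⟩ := hqr
              simp only [Bool.and_eq_true, decide_eq_true_eq, Bool.not_eq_true',
                ← Bool.not_eq_true, PySem.Set.contains_iff]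
              refine ⟨⟨⟨⟨⟨⟨by omega, by omega⟩, by omega⟩, by omega⟩,
                hfreeY q.1 r1 r2⟩, hfreeX q.2 r3 r4⟩, hqm⟩
        have hlen' : memo'.length ≤ rectK lo hi lo' hi' + g.length :=
          memo_card_le _ _ _ _ _ _ hnd' hmemo1
        refine ih (rest ++ flt) memo' (total + 1)
          ⟨hnd', hmemo1, hres', hstart', hgsub', htot', hclosed'⟩ ?_
        have hfl : flt.length ≤ 4 := by
          calc flt.length ≤ ([(y, x + 1), (y, x - 1), (y + 1, x), (y - 1, x)]).length :=
                List.length_filter_le _ _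
            _ = 4 := rfl
        unfold muP at hmu ⊢
        rw [hmemo'def] at *
        simp only [List.length_cons, List.length_append] at *
        omega

-- the free row/column run characterisation shared by both final proofs
def PacRuns (N qy qx : Int) (R C : List Int) (lo hi lo' hi' : Int) : Prop :=
  (-1 ≤ lo ∧ lo < qy ∧ (lo = -1 ∨ lo ∈ R) ∧ ∀ r ∈ R, -1 ≤ r → r < qy → r ≤ lo) ∧
  (qy < hi ∧ hi ≤ N ∧ (hi = N ∨ hi ∈ R) ∧ ∀ r ∈ R, qy < r → r ≤ N → hi ≤ r) ∧
  (-1 ≤ lo' ∧ lo' < qx ∧ (lo' = -1 ∨ lo' ∈ C) ∧ ∀ c ∈ C, -1 ≤ c → c < qx → c ≤ lo') ∧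
  (qx < hi' ∧ hi' ≤ N ∧ (hi' = N ∨ hi' ∈ C) ∧ ∀ c ∈ C, qx < c → c ≤ N → hi' ≤ c)
lemma maxGood (py r a : Int) (R : List Int)
    (h1 : -1 ≤ a) (h2 : a < py) (h3 : a = -1 ∨ a ∈ R) (h4 : ∀ x ∈ R, -1 ≤ x → x < py → x ≤ a) :
    -1 ≤ (if -1 ≤ r ∧ r < py then max a r else a) ∧
    (if -1 ≤ r ∧ r < py then max a r else a) < py ∧
    ((if -1 ≤ r ∧ r < py then max a r else a) = -1 ∨
      (if -1 ≤ r ∧ r < py then max a r else a) ∈ R ++ [r]) ∧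
    ∀ x ∈ R ++ [r], -1 ≤ x → x < py → x ≤ (if -1 ≤ r ∧ r < py then max a r else a) := by
  have hR : ∀ x, x ∈ R → x ∈ R ++ [r] := by intro x hx; rw [List.mem_append]; left; exact hx
  have hr : r ∈ R ++ [r] := by rw [List.mem_append]; right; exact List.mem_singleton_self r
  split_ifs with h
  · refine ⟨by omega, by omega, ?_, ?_⟩
    · rcases le_total a r with hh | hh
      · rw [max_eq_right hh]; right; exact hr
      · rw [max_eq_left hh]
        rcases h3 with h3 | h3
        · left; exact h3
        · right; exact hR a h3
    · intro x hx hx1 hx2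
      rw [List.mem_append, List.mem_singleton] at hx
      rcases hx with hx | hx
      · exact le_trans (h4 x hx hx1 hx2) (le_max_left a r)
      · rw [hx]; exact le_max_right a r
  · refine ⟨h1, h2, ?_, ?_⟩
    · rcases h3 with h3 | h3
      · left; exact h3
      · right; exact hR a h3
    · intro x hx hx1 hx2
      rw [List.mem_append, List.mem_singleton] at hx
      rcases hx with hx | hx
      · exact h4 x hx hx1 hx2
      · omega

lemma minGood (N py r b : Int) (R : List Int)
    (h1 : py < b) (h2 : b ≤ N) (h3 : b = N ∨ b ∈ R) (h4 : ∀ x ∈ R, py < x → x ≤ N → b ≤ x) :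
    py < (if py < r ∧ r ≤ N then min b r else b) ∧
    (if py < r ∧ r ≤ N then min b r else b) ≤ N ∧
    ((if py < r ∧ r ≤ N then min b r else b) = N ∨
      (if py < r ∧ r ≤ N then min b r else b) ∈ R ++ [r]) ∧
    ∀ x ∈ R ++ [r], py < x → x ≤ N → (if py < r ∧ r ≤ N then min b r else b) ≤ x := by
  have hR : ∀ x, x ∈ R → x ∈ R ++ [r] := by intro x hx; rw [List.mem_append]; left; exact hx
  have hr : r ∈ R ++ [r] := by rw [List.mem_append]; right; exact List.mem_singleton_self r
  split_ifs with h
  · refine ⟨by omega, by omega, ?_, ?_⟩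
    · rcases le_total b r with hh | hh
      · rw [min_eq_left hh]
        rcases h3 with h3 | h3
        · left; exact h3
        · right; exact hR b h3
      · rw [min_eq_right hh]; right; exact hr
    · intro x hx hx1 hx2
      rw [List.mem_append, List.mem_singleton] at hx
      rcases hx with hx | hx
      · exact le_trans (min_le_left b r) (h4 x hx hx1 hx2)
      · rw [hx]; exact min_le_right b r
  · refine ⟨h1, h2, ?_, ?_⟩
    · rcases h3 with h3 | h3
      · left; exact h3
      · right; exact hR b h3
    · intro x hx hx1 hx2
      rw [List.mem_append, List.mem_singleton] at hx
      rcases hx with hx | hx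
      · exact h4 x hx hx1 hx2
      · omega

-- canonical runs for an arbitrary on-board cell (used for the entry cell of an
-- off-board start): folds computing the nearest walls
def runLo (qy : Int) (R : List Int) : Int :=
  R.foldl (fun a r => if -1 ≤ r ∧ r < qy then max a r else a) (-1)
def runHi (N qy : Int) (R : List Int) : Int :=
  R.foldl (fun b r => if qy < r ∧ r ≤ N then min b r else b) N

lemma runLo_good (qy : Int) (hqy : 0 ≤ qy) (R : List Int) :
    -1 ≤ runLo qy R ∧ runLo qy R < qy ∧ (runLo qy R = -1 ∨ runLo qy R ∈ R) ∧
    ∀ x ∈ R, -1 ≤ x → x < qy → x ≤ runLo qy R := by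
  have aux : ∀ (l : List Int) (Rs : List Int) (a : Int),
      (-1 ≤ a ∧ a < qy ∧ (a = -1 ∨ a ∈ Rs) ∧ ∀ x ∈ Rs, -1 ≤ x → x < qy → x ≤ a) →
      (-1 ≤ l.foldl (fun a r => if -1 ≤ r ∧ r < qy then max a r else a) a ∧
       l.foldl (fun a r => if -1 ≤ r ∧ r < qy then max a r else a) a < qy ∧
       (l.foldl (fun a r => if -1 ≤ r ∧ r < qy then max a r else a) a = -1 ∨
        l.foldl (fun a r => if -1 ≤ r ∧ r < qy then max a r else a) a ∈ Rs ++ l) ∧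
       ∀ x ∈ Rs ++ l, -1 ≤ x → x < qy →
        x ≤ l.foldl (fun a r => if -1 ≤ r ∧ r < qy then max a r else a) a) := by
    intro l
    induction l with
    | nil => intro Rs a h; simpa using h
    | cons r l ih =>
      intro Rs a h
      obtain ⟨h1, h2, h3, h4⟩ := h
      have := ih (Rs ++ [r]) (if -1 ≤ r ∧ r < qy then max a r else a)
        (maxGood qy r a Rs h1 h2 h3 h4)
      simpa [List.append_assoc] using this
  have base := aux R [] (-1) ⟨le_refl _, by omega, Or.inl rfl, by simp⟩
  simpa [runLo] using base

lemma runHi_good (N qy : Int) (hqy : qy < N) (R : List Int) :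
    qy < runHi N qy R ∧ runHi N qy R ≤ N ∧ (runHi N qy R = N ∨ runHi N qy R ∈ R) ∧
    ∀ x ∈ R, qy < x → x ≤ N → runHi N qy R ≤ x := by
  have aux : ∀ (l : List Int) (Rs : List Int) (b : Int),
      (qy < b ∧ b ≤ N ∧ (b = N ∨ b ∈ Rs) ∧ ∀ x ∈ Rs, qy < x → x ≤ N → b ≤ x) →
      (qy < l.foldl (fun b r => if qy < r ∧ r ≤ N then min b r else b) b ∧
       l.foldl (fun b r => if qy < r ∧ r ≤ N then min b r else b) b ≤ N ∧
       (l.foldl (fun b r => if qy < r ∧ r ≤ N then min b r else b) b = N ∨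
        l.foldl (fun b r => if qy < r ∧ r ≤ N then min b r else b) b ∈ Rs ++ l) ∧
       ∀ x ∈ Rs ++ l, qy < x → x ≤ N →
        l.foldl (fun b r => if qy < r ∧ r ≤ N then min b r else b) b ≤ x) := by
    intro l
    induction l with
    | nil => intro Rs b h; simpa using h
    | cons r l ih =>
      intro Rs b h
      obtain ⟨h1, h2, h3, h4⟩ := h
      have := ih (Rs ++ [r]) (if qy < r ∧ r ≤ N then min b r else b)
        (minGood N qy r b Rs h1 h2 h3 h4)
      simpa [List.append_assoc] using this
  have base := aux R [] N ⟨hqy, le_refl _, Or.inl rfl, by simp⟩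
  simpa [runHi] using base

lemma runs_exists (N qy qx : Int) (hqy0 : 0 ≤ qy) (hqyN : qy < N) (hqx0 : 0 ≤ qx)
    (hqxN : qx < N) (R C : List Int) :
    PacRuns N qy qx R C (runLo qy R) (runHi N qy R) (runLo qx C) (runHi N qx C) :=
  ⟨runLo_good qy hqy0 R, runHi_good N qy hqyN R,
   runLo_good qx hqx0 C, runHi_good N qx hqxN C⟩

-- the blocked flag of B's fold: set iff some enemy shares PacMan's row or column
lemma pacStep_blocked_iff (py px : Int) (l : List (List Int)) :
    ∀ (s : Int × Int × Int × Int × Bool),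
      ((l.foldl (pacStep py px) s).2.2.2.2 = true) ↔
      (s.2.2.2.2 = true ∨ py ∈ l.map (fun e => PySem.List.pyGetD e 0 0) ∨
        px ∈ l.map (fun e => PySem.List.pyGetD e 1 0)) := by
  induction l with
  | nil => intro s; simp
  | cons e l ih =>
    intro s
    rw [List.foldl_cons, ih]
    by_cases hb : s.2.2.2.2 = true
    · have he : pacStep py px s e = s := by unfold pacStep; rw [hb]; simp
      rw [he]
      simp [hb]
    · rw [Bool.not_eq_true] at hb
      by_cases hbl : PySem.List.pyGetD e 0 0 = py ∨ PySem.List.pyGetD e 1 0 = px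
      · have he : (pacStep py px s e).2.2.2.2 = true := by
          unfold pacStep; rw [hb]
          simp only [Bool.false_eq_true, if_false]
          rw [if_pos hbl]
        rw [he]
        simp only [List.map_cons, List.mem_cons, hb, Bool.false_eq_true, false_or]
        constructor
        · intro _
          rcases hbl with h | h
          · exact Or.inl (Or.inl h.symm)
          · exact Or.inr (Or.inl h.symm)
        · intro _; exact Or.inl trivial
      · have he : (pacStep py px s e).2.2.2.2 = false := by
          unfold pacStep; rw [hb]
          simp only [Bool.false_eq_true, if_false]
          rw [if_neg hbl]
        rw [he]
        push_neg at hbl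
        simp only [List.map_cons, List.mem_cons, hb, Bool.false_eq_true, false_or]
        constructor
        · rintro (h | h)
          · exact Or.inl (Or.inr h)
          · exact Or.inr (Or.inr h)
        · rintro ((h | h) | (h | h))
          · exact absurd h.symm hbl.1
          · exact Or.inl h
          · exact absurd h.symm hbl.2
          · exact Or.inr h

-- 1D step of B's unblocked update, lower wall (bottom is one above the wall)
lemma botGood (py r a : Int) (R : List Int) (hr : r ≠ py)
    (h1 : -1 ≤ a - 1) (h2 : a - 1 < py) (h3 : a - 1 = -1 ∨ a - 1 ∈ R)
    (h4 : ∀ x ∈ R, -1 ≤ x → x < py → x ≤ a - 1) :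
    -1 ≤ (if r < py then max a (r + 1) else a) - 1 ∧
    (if r < py then max a (r + 1) else a) - 1 < py ∧
    ((if r < py then max a (r + 1) else a) - 1 = -1 ∨
      (if r < py then max a (r + 1) else a) - 1 ∈ R ++ [r]) ∧
    ∀ x ∈ R ++ [r], -1 ≤ x → x < py → x ≤ (if r < py then max a (r + 1) else a) - 1 := by
  have hR : ∀ x, x ∈ R → x ∈ R ++ [r] := by intro x hx; rw [List.mem_append]; left; exact hx
  have hrm : r ∈ R ++ [r] := by rw [List.mem_append]; right; exact List.mem_singleton_self r
  split_ifs with h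
  · refine ⟨by omega, by omega, ?_, ?_⟩
    · rcases le_total a (r + 1) with hh | hh
      · rw [max_eq_right hh]
        right
        simpa using hrm
      · rw [max_eq_left hh]
        rcases h3 with h3 | h3
        · left; exact h3
        · right; exact hR _ h3
    · intro x hx hx1 hx2
      rw [List.mem_append, List.mem_singleton] at hx
      rcases hx with hx | hx
      · have := h4 x hx hx1 hx2
        have := le_max_left a (r + 1)
        omega
      · subst hx
        have := le_max_right a (x + 1)
        omega
  · refine ⟨h1, h2, ?_, ?_⟩
    · rcases h3 with h3 | h3
      · left; exact h3
      · right; exact hR _ h3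
    · intro x hx hx1 hx2
      rw [List.mem_append, List.mem_singleton] at hx
      rcases hx with hx | hx
      · exact h4 x hx hx1 hx2
      · omega

-- 1D step of B's unblocked update, upper wall
lemma topGood (N py r b : Int) (R : List Int) (hr : r ≠ py)
    (h1 : py < b) (h2 : b ≤ N) (h3 : b = N ∨ b ∈ R)
    (h4 : ∀ x ∈ R, py < x → x ≤ N → b ≤ x) :
    py < (if r < py then b else min b r) ∧
    (if r < py then b else min b r) ≤ N ∧
    ((if r < py then b else min b r) = N ∨ (if r < py then b else min b r) ∈ R ++ [r]) ∧
    ∀ x ∈ R ++ [r], py < x → x ≤ N → (if r < py then b else min b r) ≤ x := by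
  have hR : ∀ x, x ∈ R → x ∈ R ++ [r] := by intro x hx; rw [List.mem_append]; left; exact hx
  have hrm : r ∈ R ++ [r] := by rw [List.mem_append]; right; exact List.mem_singleton_self r
  split_ifs with h
  · refine ⟨h1, h2, ?_, ?_⟩
    · rcases h3 with h3 | h3
      · left; exact h3
      · right; exact hR _ h3
    · intro x hx hx1 hx2
      rw [List.mem_append, List.mem_singleton] at hx
      rcases hx with hx | hx
      · exact h4 x hx hx1 hx2
      · omega
  · have hrpy : py < r := by omega
    refine ⟨by omega, by omega, ?_, ?_⟩
    · rcases le_total b r with hh | hh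
      · rw [min_eq_left hh]
        rcases h3 with h3 | h3
        · left; exact h3
        · right; exact hR _ h3
      · rw [min_eq_right hh]; right; exact hrm
    · intro x hx hx1 hx2
      rw [List.mem_append, List.mem_singleton] at hx
      rcases hx with hx | hx
      · exact le_trans (min_le_left b r) (h4 x hx hx1 hx2)
      · rw [hx]; exact min_le_right b r

-- invariant of B's fold on the row/column-free path: the state describes the runs
lemma pacFold_runs (N py px : Int) (hpy0 : 0 ≤ py) (hpyN : py < N) (hpx0 : 0 ≤ px)
    (hpxN : px < N) (enemies : List (List Int))
    (hfree : ∀ e ∈ enemies, PySem.List.pyGetD e 0 0 ≠ py ∧ PySem.List.pyGetD e 1 0 ≠ px) :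
    PacRuns N py px (enemies.map (fun e => PySem.List.pyGetD e 0 0))
      (enemies.map (fun e => PySem.List.pyGetD e 1 0))
      ((enemies.foldl (pacStep py px) (0, N, 0, N, false)).1 - 1)
      ((enemies.foldl (pacStep py px) (0, N, 0, N, false)).2.1)
      ((enemies.foldl (pacStep py px) (0, N, 0, N, false)).2.2.1 - 1)
      ((enemies.foldl (pacStep py px) (0, N, 0, N, false)).2.2.2.1) := by
  have aux : ∀ (l : List (List Int)) (R C : List Int) (s : Int × Int × Int × Int × Bool),
      (∀ e ∈ l, PySem.List.pyGetD e 0 0 ≠ py ∧ PySem.List.pyGetD e 1 0 ≠ px) →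
      s.2.2.2.2 = false →
      PacRuns N py px R C (s.1 - 1) s.2.1 (s.2.2.1 - 1) s.2.2.2.1 →
      PacRuns N py px (R ++ l.map (fun e => PySem.List.pyGetD e 0 0))
        (C ++ l.map (fun e => PySem.List.pyGetD e 1 0))
        ((l.foldl (pacStep py px) s).1 - 1) ((l.foldl (pacStep py px) s).2.1)
        ((l.foldl (pacStep py px) s).2.2.1 - 1) ((l.foldl (pacStep py px) s).2.2.2.1) := by
    intro l
    induction l with
    | nil => intro R C s _ _ h; simpa using h
    | cons e l ih =>
      intro R C s hf hs h
      obtain ⟨hne1, hne2⟩ := hf e List.mem_cons_self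
      obtain ⟨⟨a1, a2, a3, a4⟩, ⟨b1, b2, b3, b4⟩, ⟨c1, c2, c3, c4⟩, ⟨d1, d2, d3, d4⟩⟩ := h
      have hstep : pacStep py px s e =
          ((if PySem.List.pyGetD e 0 0 < py then max s.1 (PySem.List.pyGetD e 0 0 + 1)
              else s.1),
           (if PySem.List.pyGetD e 0 0 < py then s.2.1
              else min s.2.1 (PySem.List.pyGetD e 0 0)),
           (if PySem.List.pyGetD e 1 0 < px then max s.2.2.1 (PySem.List.pyGetD e 1 0 + 1)
              else s.2.2.1),
           (if PySem.List.pyGetD e 1 0 < px then s.2.2.2.1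
              else min s.2.2.2.1 (PySem.List.pyGetD e 1 0)),
           false) := by
        unfold pacStep
        rw [hs]
        simp only [Bool.false_eq_true, if_false]
        rw [if_neg (by push_neg; exact ⟨hne1, hne2⟩)]
      rw [List.foldl_cons, hstep]
      have hruns' : PacRuns N py px (R ++ [PySem.List.pyGetD e 0 0])
          (C ++ [PySem.List.pyGetD e 1 0])
          ((if PySem.List.pyGetD e 0 0 < py then max s.1 (PySem.List.pyGetD e 0 0 + 1)
              else s.1) - 1)
          (if PySem.List.pyGetD e 0 0 < py then s.2.1
              else min s.2.1 (PySem.List.pyGetD e 0 0))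
          ((if PySem.List.pyGetD e 1 0 < px then max s.2.2.1 (PySem.List.pyGetD e 1 0 + 1)
              else s.2.2.1) - 1)
          (if PySem.List.pyGetD e 1 0 < px then s.2.2.2.1
              else min s.2.2.2.1 (PySem.List.pyGetD e 1 0)) :=
        ⟨botGood py _ s.1 R hne1 a1 a2 a3 a4,
         topGood N py _ s.2.1 R hne1 b1 b2 b3 b4,
         botGood px _ s.2.2.1 C hne2 c1 c2 c3 c4,
         topGood N px _ s.2.2.2.1 C hne2 d1 d2 d3 d4⟩
      have hnext := ih (R ++ [PySem.List.pyGetD e 0 0]) (C ++ [PySem.List.pyGetD e 1 0])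
        ((if PySem.List.pyGetD e 0 0 < py then max s.1 (PySem.List.pyGetD e 0 0 + 1)
            else s.1),
         (if PySem.List.pyGetD e 0 0 < py then s.2.1
            else min s.2.1 (PySem.List.pyGetD e 0 0)),
         (if PySem.List.pyGetD e 1 0 < px then max s.2.2.1 (PySem.List.pyGetD e 1 0 + 1)
            else s.2.2.1),
         (if PySem.List.pyGetD e 1 0 < px then s.2.2.2.1
            else min s.2.2.2.1 (PySem.List.pyGetD e 1 0)),
         false)
        (fun e' he' => hf e' (List.mem_cons_of_mem _ he')) rfl hruns'
      simpa [List.append_assoc] using hnext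
  have base : PacRuns N py px [] [] ((0 : Int) - 1) N ((0 : Int) - 1) N := by
    unfold PacRuns
    norm_num
    omega
  simpa using aux enemies [] [] (0, N, 0, N, false) hfree rfl base

lemma pacNbrOk_iff (N : Int) (ys xs : PySem.Set Int) (m : PySem.Set (Int × Int))
    (q : Int × Int) :
    pacNbrOk N ys xs m q = true ↔
      (0 ≤ q.1 ∧ q.1 < N ∧ 0 ≤ q.2 ∧ q.2 < N ∧ q.1 ∉ (ys : List Int) ∧
        q.2 ∉ (xs : List Int) ∧ q ∉ (m : List (Int × Int))) := by
  unfold pacNbrOk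
  simp only [Bool.and_eq_true, decide_eq_true_eq, Bool.not_eq_true',
    ← Bool.not_eq_true, PySem.Set.contains_iff]
  tauto

-- the first iteration of A's loop: the (possibly off-board) free start is visited
lemma pacLoop_start (N : Int) (ys xs : PySem.Set Int) (F : Nat) (py px : Int)
    (hy : py ∉ (ys : List Int)) (hx : px ∉ (xs : List Int)) :
    pacLoop N ys xs (F + 1) [(py, px)] PySem.Set.empty (-1) =
      pacLoop N ys xs F
        ([(py, px + 1), (py, px - 1), (py + 1, px), (py - 1, px)].filter
          (pacNbrOk N ys xs [(py, px)]))
        [(py, px)] 0 := by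
  have hyc : PySem.Set.contains ys py = false := by
    rw [← Bool.not_eq_true, PySem.Set.contains_iff]; exact hy
  have hxc : PySem.Set.contains xs px = false := by
    rw [← Bool.not_eq_true, PySem.Set.contains_iff]; exact hx
  have hmc : PySem.Set.contains (PySem.Set.empty : PySem.Set (Int × Int)) (py, px) = false :=
    rfl
  have hadd : PySem.Set.add (PySem.Set.empty : PySem.Set (Int × Int)) (py, px) = [(py, px)] :=
    PySem.Set.add_of_not_mem (List.not_mem_nil)
  simp only [pacLoop, hyc, hxc, hmc, Bool.false_or, hadd]
  norm_num

lemma pacLoop_nil (N : Int) (ys xs : PySem.Set Int) (n : Nat)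
    (memo : PySem.Set (Int × Int)) (total : Int) (h : 0 < n) :
    pacLoop N ys xs n [] memo total = total := by
  cases n with
  | zero => omega
  | succ n => rfl

-- free rows strictly between the walls are not enemy rows
lemma run_free (N qy lo hi : Int) (R : List Int) (hlo : -1 ≤ lo)
    (ha : ∀ r ∈ R, -1 ≤ r → r < qy → r ≤ lo) (hb : ∀ r ∈ R, qy < r → r ≤ N → hi ≤ r)
    (hhi : hi ≤ N) (hq : qy ∉ R) :
    ∀ y, lo < y → y < hi → y ∉ (PySem.Set.ofList R : List Int) := by
  intro y h1 h2 hmem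
  rw [PySem.Set.mem_ofList] at hmem
  rcases lt_trichotomy y qy with h | h | h
  · have := ha y hmem (by omega) h; omega
  · exact hq (h ▸ hmem)
  · have := hb y hmem h (by omega); omega

lemma wall_ofList (v N : Int) (R : List Int) (h : v = N ∨ v ∈ R) :
    v = N ∨ v ∈ (PySem.Set.ofList R : List Int) := by
  rcases h with h | h
  · left; exact h
  · right; rw [PySem.Set.mem_ofList]; exact h

-- A's loop when PacMan's own row or column is blocked: the start is skipped, result -1
lemma pac_blocked (N py px : Int) (R C : List Int) (h : py ∈ R ∨ px ∈ C) :
    max (pacLoop N (PySem.Set.ofList R) (PySem.Set.ofList C)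
      (4 * (N.toNat * N.toNat + 1) + 2) [(py, px)] PySem.Set.empty (-1)) 0 = 0 := by
  have hmc : PySem.Set.contains (PySem.Set.empty : PySem.Set (Int × Int)) (py, px) = false :=
    rfl
  have efuel : 4 * (N.toNat * N.toNat + 1) + 2 = (4 * (N.toNat * N.toNat + 1) + 1) + 1 := rfl
  rw [efuel]
  have hstep : pacLoop N (PySem.Set.ofList R) (PySem.Set.ofList C)
      ((4 * (N.toNat * N.toNat + 1) + 1) + 1) [(py, px)] PySem.Set.empty (-1) =
      pacLoop N (PySem.Set.ofList R) (PySem.Set.ofList C)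
      (4 * (N.toNat * N.toNat + 1) + 1) [] PySem.Set.empty (-1) := by
    rcases h with h | h
    · have hc : PySem.Set.contains (PySem.Set.ofList R) py = true := by
        rw [PySem.Set.contains_iff, PySem.Set.mem_ofList]; exact h
      simp only [pacLoop, hmc, hc, Bool.false_or, Bool.true_or, if_true]
    · have hc : PySem.Set.contains (PySem.Set.ofList C) px = true := by
        rw [PySem.Set.contains_iff, PySem.Set.mem_ofList]; exact h
      simp only [pacLoop, hmc, hc, Bool.false_or, Bool.or_true, if_true]
  rw [hstep, pacLoop_nil _ _ _ _ _ _ (by omega)]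
  decide

-- A's loop when the free start is neither on the board nor one step outside it
lemma pac_far (N py px : Int) (R C : List Int)
    (hon : ¬(0 ≤ py ∧ py < N ∧ 0 ≤ px ∧ px < N))
    (h1 : ¬((py = -1 ∨ py = N) ∧ 0 ≤ px ∧ px < N))
    (h2 : ¬((px = -1 ∨ px = N) ∧ 0 ≤ py ∧ py < N))
    (hpyR : py ∉ R) (hpxC : px ∉ C) :
    max (pacLoop N (PySem.Set.ofList R) (PySem.Set.ofList C)
      (4 * (N.toNat * N.toNat + 1) + 2) [(py, px)] PySem.Set.empty (-1)) 0 = 0 := by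
  have hyO : py ∉ (PySem.Set.ofList R : List Int) := by
    rw [PySem.Set.mem_ofList]; exact hpyR
  have hxO : px ∉ (PySem.Set.ofList C : List Int) := by
    rw [PySem.Set.mem_ofList]; exact hpxC
  have efuel : 4 * (N.toNat * N.toNat + 1) + 2 = (4 * (N.toNat * N.toNat + 1) + 1) + 1 := rfl
  rw [efuel, pacLoop_start N _ _ _ py px hyO hxO]
  have hf : ∀ q ∈ [(py, px + 1), (py, px - 1), (py + 1, px), (py - 1, px)],
      pacNbrOk N (PySem.Set.ofList R) (PySem.Set.ofList C) [(py, px)] q = false := by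
    intro q hq
    rw [← Bool.not_eq_true, pacNbrOk_iff]
    intro hT
    obtain ⟨t1, t2, t3, t4, _⟩ := hT
    obtain ⟨z, w⟩ := q
    simp only [List.mem_cons, List.not_mem_nil, or_false, Prod.mk.injEq] at hq
    simp only at t1 t2 t3 t4
    rcases hq with ⟨f1, f2⟩ | ⟨f1, f2⟩ | ⟨f1, f2⟩ | ⟨f1, f2⟩ <;> omega
  have hflt : ([(py, px + 1), (py, px - 1), (py + 1, px), (py - 1, px)].filter
      (pacNbrOk N (PySem.Set.ofList R) (PySem.Set.ofList C) [(py, px)])) = [] :=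
    List.filter_eq_nil_iff.mpr (by intro a ha; rw [hf a ha]; exact Bool.false_ne_true)
  rw [hflt, pacLoop_nil _ _ _ _ _ _ (by omega)]
  decide

-- A's loop from a free start one step outside the board next to entry cell (qy, qx)
lemma pac_off (N py px qy qx lo hi lo' hi' : Int) (R C : List Int)
    (hrun : PacRuns N qy qx R C lo hi lo' hi')
    (hoff : (px = qx ∧ ¬(0 ≤ py ∧ py < N) ∧ (py = qy - 1 ∨ py = qy + 1)) ∨
            (py = qy ∧ ¬(0 ≤ px ∧ px < N) ∧ (px = qx - 1 ∨ px = qx + 1)))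
    (hpyR : py ∉ R) (hpxC : px ∉ C) :
    max (pacLoop N (PySem.Set.ofList R) (PySem.Set.ofList C)
      (4 * (N.toNat * N.toNat + 1) + 2) [(py, px)] PySem.Set.empty (-1)) 0 =
    (if qy ∈ R ∨ qx ∈ C then 0 else (hi - lo - 1) * (hi' - lo' - 1)) := by
  obtain ⟨⟨a1, a2, a3, a4⟩, ⟨b1, b2, b3, b4⟩, ⟨c1, c2, c3, c4⟩, ⟨d1, d2, d3, d4⟩⟩ := hrun
  have hqy0 : 0 ≤ qy := by omega
  have hqyN : qy < N := by omega
  have hqx0 : 0 ≤ qx := by omega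
  have hqxN : qx < N := by omega
  have hyO : py ∉ (PySem.Set.ofList R : List Int) := by
    rw [PySem.Set.mem_ofList]; exact hpyR
  have hxO : px ∉ (PySem.Set.ofList C : List Int) := by
    rw [PySem.Set.mem_ofList]; exact hpxC
  have efuel : 4 * (N.toNat * N.toNat + 1) + 2 = (4 * (N.toNat * N.toNat + 1) + 1) + 1 := rfl
  rw [efuel, pacLoop_start N _ _ _ py px hyO hxO]
  have hentry : ((qy, qx) : Int × Int) ∈ [(py, px + 1), (py, px - 1), (py + 1, px), (py - 1, px)] := by
    simp only [List.mem_cons, List.not_mem_nil, or_false, Prod.mk.injEq]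
    rcases hoff with ⟨e1, e2, e3 | e3⟩ | ⟨e1, e2, e3 | e3⟩ <;> omega
  have hne : ((py, px) : Int × Int) ≠ (qy, qx) := by
    simp only [Ne, Prod.mk.injEq, not_and]
    intro h1
    rcases hoff with ⟨e1, e2, e3 | e3⟩ | ⟨e1, e2, e3 | e3⟩ <;> omega
  by_cases hEb : qy ∈ R ∨ qx ∈ C
  · -- the entry cell is blocked: nothing is reachable
    rw [if_pos hEb]
    have hf : ∀ q ∈ [(py, px + 1), (py, px - 1), (py + 1, px), (py - 1, px)],
        pacNbrOk N (PySem.Set.ofList R) (PySem.Set.ofList C) [(py, px)] q = false := by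
      intro q hq
      rw [← Bool.not_eq_true, pacNbrOk_iff]
      intro hT
      obtain ⟨t1, t2, t3, t4, t5, t6, _⟩ := hT
      rw [PySem.Set.mem_ofList] at t5 t6
      have hqe : q = (qy, qx) := by
        simp only [List.mem_cons, List.not_mem_nil, or_false, Prod.mk.injEq] at hq
        obtain ⟨z, w⟩ := q
        simp only [Prod.mk.injEq] at hq ⊢
        simp only at t1 t2 t3 t4
        rcases hoff with ⟨e1, e2, e3 | e3⟩ | ⟨e1, e2, e3 | e3⟩ <;>
          rcases hq with ⟨f1, f2⟩ | ⟨f1, f2⟩ | ⟨f1, f2⟩ | ⟨f1, f2⟩ <;> omega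
      rw [hqe] at t5 t6
      simp only at t5 t6
      rcases hEb with h | h
      · exact t5 h
      · exact t6 h
    have hflt : ([(py, px + 1), (py, px - 1), (py + 1, px), (py - 1, px)].filter
        (pacNbrOk N (PySem.Set.ofList R) (PySem.Set.ofList C) [(py, px)])) = [] :=
      List.filter_eq_nil_iff.mpr (by intro a ha; rw [hf a ha]; exact Bool.false_ne_true)
    rw [hflt, pacLoop_nil _ _ _ _ _ _ (by omega)]
    decide
  · -- the entry cell is free: the loop fills its rectangle plus the ghost start
    rw [if_neg hEb]
    have hqyR : qy ∉ R := fun h => hEb (Or.inl h)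
    have hqxC : qx ∉ C := fun h => hEb (Or.inr h)
    have hfT : pacNbrOk N (PySem.Set.ofList R) (PySem.Set.ofList C) [(py, px)] (qy, qx)
        = true := by
      rw [pacNbrOk_iff]
      refine ⟨hqy0, hqyN, hqx0, hqxN, ?_, ?_, ?_⟩
      · simp only
        rw [PySem.Set.mem_ofList]; exact hqyR
      · simp only
        rw [PySem.Set.mem_ofList]; exact hqxC
      · simp only [List.mem_cons, List.not_mem_nil, or_false]
        intro h; exact hne h.symm
    have hfF : ∀ q ∈ [(py, px + 1), (py, px - 1), (py + 1, px), (py - 1, px)],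
        q ≠ (qy, qx) →
        pacNbrOk N (PySem.Set.ofList R) (PySem.Set.ofList C) [(py, px)] q = false := by
      intro q hq hqne
      rw [← Bool.not_eq_true, pacNbrOk_iff]
      intro hT
      obtain ⟨t1, t2, t3, t4, _⟩ := hT
      apply hqne
      simp only [List.mem_cons, List.not_mem_nil, or_false, Prod.mk.injEq] at hq
      obtain ⟨z, w⟩ := q
      simp only [Prod.mk.injEq] at hq ⊢
      simp only at t1 t2 t3 t4
      rcases hoff with ⟨e1, e2, e3 | e3⟩ | ⟨e1, e2, e3 | e3⟩ <;>
        rcases hq with ⟨f1, f2⟩ | ⟨f1, f2⟩ | ⟨f1, f2⟩ | ⟨f1, f2⟩ <;> omega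
    have hflt : ([(py, px + 1), (py, px - 1), (py + 1, px), (py - 1, px)].filter
        (pacNbrOk N (PySem.Set.ofList R) (PySem.Set.ofList C) [(py, px)])) = [(qy, qx)] := by
      have hdec : ∀ q ∈ [(py, px + 1), (py, px - 1), (py + 1, px), (py - 1, px)],
          pacNbrOk N (PySem.Set.ofList R) (PySem.Set.ofList C) [(py, px)] q =
            decide (q = (qy, qx)) := by
        intro q hq
        by_cases hqq : q = (qy, qx)
        · rw [hqq, hfT]; simp
        · rw [hfF q hq hqq]; simp [hqq]
      rw [List.filter_congr hdec]
      simp only [List.mem_cons, List.not_mem_nil, or_false, Prod.mk.injEq] at hentry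
      simp only [List.filter_cons, List.filter_nil, decide_eq_true_eq, Prod.mk.injEq]
      rcases hoff with ⟨e1, e2, e3 | e3⟩ | ⟨e1, e2, e3 | e3⟩ <;>
        split_ifs with i1 i2 i3 i4 <;> first
          | (exfalso; omega)
          | (simp only [List.cons.injEq, Prod.mk.injEq, and_true]; omega)
          | rfl
    rw [hflt]
    have hmain := pacLoop_eq N qy qx lo hi lo' hi'
      (PySem.Set.ofList R) (PySem.Set.ofList C)
      a1 b2 a2 b1 c1 d2 c2 d1
      (run_free N qy lo hi R a1 a4 b4 b2 hqyR)
      (run_free N qx lo' hi' C c1 c4 d4 d2 hqxC)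
      (wall_ofList lo (-1) R a3) (wall_ofList hi N R b3)
      (wall_ofList lo' (-1) C c3)
      (wall_ofList hi' N C d3)
      [(py, px)] (List.nodup_singleton _) ?_
      (4 * (N.toNat * N.toNat + 1) + 1) [(qy, qx)] [(py, px)] 0 ?_ ?_
    · rw [hmain]
      have hpos1 : 1 ≤ hi - lo - 1 := by omega
      have hpos2 : 1 ≤ hi' - lo' - 1 := by omega
      have hpos := mul_le_mul hpos1 hpos2 (by omega) (by omega)
      simp only [List.length_singleton]
      rw [max_eq_left (by push_cast; omega)]
      push_cast
      ring
    · intro p hp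
      rw [List.mem_singleton] at hp
      rw [hp]
      intro hin
      obtain ⟨u1, u2, u3, u4⟩ := hin
      simp only at u1 u2 u3 u4
      rcases hoff with ⟨e1, e2, e3 | e3⟩ | ⟨e1, e2, e3 | e3⟩ <;> omega
    · refine ⟨List.nodup_singleton _, ?_, ?_, Or.inr List.mem_cons_self, ?_, by simp, ?_⟩
      · intro p hp
        right; exact hp
      · intro p hp
        rw [List.mem_singleton] at hp
        rw [hp]
        exact ⟨a2, b1, c2, d1⟩
      · intro p hp; exact hp
      · intro p hp q hq hqr
        rw [List.mem_singleton] at hp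
        subst hp
        right
        rw [List.mem_singleton]
        obtain ⟨u1, u2, u3, u4⟩ := hqr
        simp only [nbrs, List.mem_cons, List.not_mem_nil, or_false, Prod.mk.injEq] at hq
        obtain ⟨z, w⟩ := q
        simp only [Prod.mk.injEq] at hq ⊢
        simp only at u1 u2 u3 u4
        rcases hoff with ⟨e1, e2, e3 | e3⟩ | ⟨e1, e2, e3 | e3⟩ <;>
          rcases hq with ⟨f1, f2⟩ | ⟨f1, f2⟩ | ⟨f1, f2⟩ | ⟨f1, f2⟩ <;> omega
    · unfold muP rectK
      simp only [List.length_singleton, List.length_cons, List.length_nil]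
      have t1 : (hi - lo - 1).toNat ≤ N.toNat := by omega
      have t2 : (hi' - lo' - 1).toNat ≤ N.toNat := by omega
      have := Nat.mul_le_mul t1 t2
      omega

-- A's loop from a free on-board start
lemma pac_on (N py px lo hi lo' hi' : Int) (R C : List Int)
    (hrun : PacRuns N py px R C lo hi lo' hi')
    (hpyR : py ∉ R) (hpxC : px ∉ C) :
    max (pacLoop N (PySem.Set.ofList R) (PySem.Set.ofList C)
      (4 * (N.toNat * N.toNat + 1) + 2) [(py, px)] PySem.Set.empty (-1)) 0 =
    (hi - lo - 1) * (hi' - lo' - 1) - 1 := by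
  obtain ⟨⟨a1, a2, a3, a4⟩, ⟨b1, b2, b3, b4⟩, ⟨c1, c2, c3, c4⟩, ⟨d1, d2, d3, d4⟩⟩ := hrun
  have hmain := pacLoop_eq N py px lo hi lo' hi'
    (PySem.Set.ofList R) (PySem.Set.ofList C)
    a1 b2 a2 b1 c1 d2 c2 d1
    (run_free N py lo hi R a1 a4 b4 b2 hpyR)
    (run_free N px lo' hi' C c1 c4 d4 d2 hpxC)
    (wall_ofList lo (-1) R a3) (wall_ofList hi N R b3)
    (wall_ofList lo' (-1) C c3) (wall_ofList hi' N C d3)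
    [] List.nodup_nil (by intro p hp; exact absurd hp List.not_mem_nil)
    (4 * (N.toNat * N.toNat + 1) + 2) [(py, px)] PySem.Set.empty (-1)
    ?_ ?_
  · rw [hmain]
    have hpos1 : 1 ≤ hi - lo - 1 := by omega
    have hpos2 : 1 ≤ hi' - lo' - 1 := by omega
    have hpos := mul_le_mul hpos1 hpos2 (by omega) (by omega)
    simp only [List.length_nil]
    rw [max_eq_left (by push_cast; omega)]
    push_cast
    ring
  · refine ⟨List.nodup_nil, by simp [PySem.Set.empty], ?_, Or.inr List.mem_cons_self,
      by simp, by simp [PySem.Set.empty], by simp [PySem.Set.empty]⟩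
    intro p hp
    rw [List.mem_singleton] at hp
    rw [hp]
    exact ⟨a2, b1, c2, d1⟩
  · unfold muP rectK
    simp only [List.length_singleton, List.length_nil, PySem.Set.empty]
    have t1 : (hi - lo - 1).toNat ≤ N.toNat := by omega
    have t2 : (hi' - lo' - 1).toNat ≤ N.toNat := by omega
    have := Nat.mul_le_mul t1 t2
    omega

-- ===== VERDICT (by name: the statements are the Claim_ definitions above) =====
set_option maxHeartbeats 1000000 in
theorem pac_man_spec : Claim_unchanged_pac_man := by
  unfold Claim_unchanged_pac_man
  intro N PM enemies _ _
  unfold Spec_pac_man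
  intro hnD
  rw [D_iff] at hnD
  by_cases henem : enemies = []
  · simp [pac_man, pac_man_alt, henem]
  · set py := PySem.List.pyGetD PM 0 0 with hpydef
    set px := PySem.List.pyGetD PM 1 0 with hpxdef
    set R := enemies.map (fun e => PySem.List.pyGetD e 0 0) with hRdef
    set C := enemies.map (fun e => PySem.List.pyGetD e 1 0) with hCdef
    have hA : pac_man N PM enemies =
        max (pacLoop N (PySem.Set.ofList R) (PySem.Set.ofList C)
          (4 * (N.toNat * N.toNat + 1) + 2) [(py, px)] PySem.Set.empty (-1)) 0 := by
      simp only [pac_man, if_neg henem]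
      rfl
    have hB : pac_man_alt N PM enemies =
        if ¬(0 ≤ py ∧ py < N ∧ 0 ≤ px ∧ px < N) then 0
        else
          if (enemies.foldl (pacStep py px) (0, N, 0, N, false)).2.2.2.2 then 0
          else ((enemies.foldl (pacStep py px) (0, N, 0, N, false)).2.1 -
                  (enemies.foldl (pacStep py px) (0, N, 0, N, false)).1) *
               ((enemies.foldl (pacStep py px) (0, N, 0, N, false)).2.2.2.1 -
                  (enemies.foldl (pacStep py px) (0, N, 0, N, false)).2.2.1) - 1 := by
      simp only [pac_man_alt, if_neg henem]
      rfl
    rw [hA, hB]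
    by_cases hbl : py ∈ R ∨ px ∈ C
    · -- PacMan's own row or column is blocked: both sides are 0
      rw [pac_blocked N py px R C hbl]
      by_cases hon : 0 ≤ py ∧ py < N ∧ 0 ≤ px ∧ px < N
      · rw [if_neg (not_not_intro hon)]
        have hb : (enemies.foldl (pacStep py px) (0, N, 0, N, false)).2.2.2.2 = true := by
          rw [pacStep_blocked_iff]
          right
          rcases hbl with h | h
          · left; exact h
          · right; exact h
        rw [hb]
        rfl
      · rw [if_pos hon]
    · have hpyR : py ∉ R := fun h => hbl (Or.inl h)
      have hpxC : px ∉ C := fun h => hbl (Or.inr h)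
      by_cases hon : 0 ≤ py ∧ py < N ∧ 0 ≤ px ∧ px < N
      · -- on the board and free: both sides are the area of the free rectangle minus 1
        rw [if_neg (not_not_intro hon)]
        have hfree : ∀ e ∈ enemies,
            PySem.List.pyGetD e 0 0 ≠ py ∧ PySem.List.pyGetD e 1 0 ≠ px := by
          intro e he
          constructor
          · intro h; exact hpyR (by rw [hRdef, List.mem_map]; exact ⟨e, he, h⟩)
          · intro h; exact hpxC (by rw [hCdef, List.mem_map]; exact ⟨e, he, h⟩)
        have hb : (enemies.foldl (pacStep py px) (0, N, 0, N, false)).2.2.2.2 = false := by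
          rw [← Bool.not_eq_true, pacStep_blocked_iff]
          push_neg
          refine ⟨by simp, ?_, ?_⟩
          · rw [← hRdef]; exact hpyR
          · rw [← hCdef]; exact hpxC
        rw [hb]
        simp only [Bool.false_eq_true, if_false]
        have hrun := pacFold_runs N py px hon.1 hon.2.1 hon.2.2.1 hon.2.2.2 enemies hfree
        rw [← hRdef, ← hCdef] at hrun
        rw [pac_on N py px _ _ _ _ R C hrun hpyR hpxC]
        ring
      · -- off the board: B is 0; show A is 0 too (D_ excludes the flooded cases)
        rw [if_pos hon]
        by_cases hadj1 : (py = -1 ∨ py = N) ∧ 0 ≤ px ∧ px < N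
        · -- one row off the board; ¬D_ forces the entry row to be blocked
          have hN1 : 1 ≤ N := by omega
          have hentryR : (if py = -1 then (0 : Int) else N - 1) ∈ R := by
            by_contra hfree0
            exact hnD ⟨henem, hpyR, hpxC, Or.inl ⟨hadj1.1, hadj1.2.1, hadj1.2.2, hfree0⟩⟩
          rcases hadj1.1 with hm | hm
          · have hq : (if py = -1 then (0 : Int) else N - 1) = py + 1 := by
              rw [if_pos hm]; omega
            rw [hq] at hentryR
            have := pac_off N py px (py + 1) px (runLo (py + 1) R) (runHi N (py + 1) R)
              (runLo px C) (runHi N px C) R C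
              (runs_exists N (py + 1) px (by omega) (by omega) hadj1.2.1 hadj1.2.2 R C)
              (Or.inl ⟨rfl, by omega, Or.inl (by omega)⟩) hpyR hpxC
            rw [this, if_pos (Or.inl hentryR)]
          · have hq : (if py = -1 then (0 : Int) else N - 1) = py - 1 := by
              rw [if_neg (by omega)]; omega
            rw [hq] at hentryR
            have := pac_off N py px (py - 1) px (runLo (py - 1) R) (runHi N (py - 1) R)
              (runLo px C) (runHi N px C) R C
              (runs_exists N (py - 1) px (by omega) (by omega) hadj1.2.1 hadj1.2.2 R C)
              (Or.inl ⟨rfl, by omega, Or.inr (by omega)⟩) hpyR hpxC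
            rw [this, if_pos (Or.inl hentryR)]
        · by_cases hadj2 : (px = -1 ∨ px = N) ∧ 0 ≤ py ∧ py < N
          · -- one column off the board; ¬D_ forces the entry column to be blocked
            have hN1 : 1 ≤ N := by omega
            have hentryC : (if px = -1 then (0 : Int) else N - 1) ∈ C := by
              by_contra hfree0
              exact hnD ⟨henem, hpyR, hpxC, Or.inr ⟨hadj2.1, hadj2.2.1, hadj2.2.2, hfree0⟩⟩
            rcases hadj2.1 with hm | hm
            · have hq : (if px = -1 then (0 : Int) else N - 1) = px + 1 := by
                rw [if_pos hm]; omega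
              rw [hq] at hentryC
              have := pac_off N py px py (px + 1) (runLo py R) (runHi N py R)
                (runLo (px + 1) C) (runHi N (px + 1) C) R C
                (runs_exists N py (px + 1) hadj2.2.1 hadj2.2.2 (by omega) (by omega) R C)
                (Or.inr ⟨rfl, by omega, Or.inl (by omega)⟩) hpyR hpxC
              rw [this, if_pos (Or.inr hentryC)]
            · have hq : (if px = -1 then (0 : Int) else N - 1) = px - 1 := by
                rw [if_neg (by omega)]; omega
              rw [hq] at hentryC
              have := pac_off N py px py (px - 1) (runLo py R) (runHi N py R)
                (runLo (px - 1) C) (runHi N (px - 1) C) R C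
                (runs_exists N py (px - 1) hadj2.2.1 hadj2.2.2 (by omega) (by omega) R C)
                (Or.inr ⟨rfl, by omega, Or.inr (by omega)⟩) hpyR hpxC
              rw [this, if_pos (Or.inr hentryC)]
          · exact pac_far N py px R C hon hadj1 hadj2 hpyR hpxC

theorem pac_man_changed : Claim_changed_pac_man := by unfold Claim_changed_pac_man; decide

set_option maxHeartbeats 1000000 in
theorem pac_man_tight : Claim_exact_pac_man := by
  unfold Claim_exact_pac_man
  intro N PM enemies _ _ hD
  rw [D_iff] at hD
  set py := PySem.List.pyGetD PM 0 0 with hpydef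
  set px := PySem.List.pyGetD PM 1 0 with hpxdef
  set R := enemies.map (fun e => PySem.List.pyGetD e 0 0) with hRdef
  set C := enemies.map (fun e => PySem.List.pyGetD e 1 0) with hCdef
  obtain ⟨henem, hpyR, hpxC, hcase⟩ := hD
  have hA : pac_man N PM enemies =
      max (pacLoop N (PySem.Set.ofList R) (PySem.Set.ofList C)
        (4 * (N.toNat * N.toNat + 1) + 2) [(py, px)] PySem.Set.empty (-1)) 0 := by
    simp only [pac_man, if_neg henem]
    rfl
  have hoffb : ¬(0 ≤ py ∧ py < N ∧ 0 ≤ px ∧ px < N) := by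
    rcases hcase with ⟨h1 | h1, _⟩ | ⟨h1 | h1, _⟩ <;> omega
  have hB : pac_man_alt N PM enemies = 0 := by
    simp only [pac_man_alt, if_neg henem]
    rw [if_pos hoffb]
  rw [hA, hB]
  rcases hcase with ⟨hoff, hpx0, hpxN, hfree0⟩ | ⟨hoff, hpy0, hpyN, hfree0⟩
  · have hN1 : 1 ≤ N := by omega
    rcases hoff with hm | hm
    · have hq : (if py = -1 then (0 : Int) else N - 1) = py + 1 := by
        rw [if_pos hm]; omega
      rw [hq] at hfree0
      have hruns := runs_exists N (py + 1) px (by omega) (by omega) hpx0 hpxN R C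
      have hval := pac_off N py px (py + 1) px (runLo (py + 1) R) (runHi N (py + 1) R)
        (runLo px C) (runHi N px C) R C hruns
        (Or.inl ⟨rfl, by omega, Or.inl (by omega)⟩) hpyR hpxC
      rw [hval, if_neg (by push_neg; exact ⟨hfree0, hpxC⟩)]
      obtain ⟨⟨a1, a2, _, _⟩, ⟨b1, _, _, _⟩, ⟨c1, c2, _, _⟩, ⟨d1, _, _, _⟩⟩ := hruns
      have h1 : 1 ≤ runHi N (py + 1) R - runLo (py + 1) R - 1 := by omega
      have h2 : 1 ≤ runHi N px C - runLo px C - 1 := by omega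
      have := mul_le_mul h1 h2 (by omega) (by omega)
      omega
    · have hq : (if py = -1 then (0 : Int) else N - 1) = py - 1 := by
        rw [if_neg (by omega)]; omega
      rw [hq] at hfree0
      have hruns := runs_exists N (py - 1) px (by omega) (by omega) hpx0 hpxN R C
      have hval := pac_off N py px (py - 1) px (runLo (py - 1) R) (runHi N (py - 1) R)
        (runLo px C) (runHi N px C) R C hruns
        (Or.inl ⟨rfl, by omega, Or.inr (by omega)⟩) hpyR hpxC
      rw [hval, if_neg (by push_neg; exact ⟨hfree0, hpxC⟩)]
      obtain ⟨⟨a1, a2, _, _⟩, ⟨b1, _, _, _⟩, ⟨c1, c2, _, _⟩, ⟨d1, _, _, _⟩⟩ := hruns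
      have h1 : 1 ≤ runHi N (py - 1) R - runLo (py - 1) R - 1 := by omega
      have h2 : 1 ≤ runHi N px C - runLo px C - 1 := by omega
      have := mul_le_mul h1 h2 (by omega) (by omega)
      omega
  · have hN1 : 1 ≤ N := by omega
    rcases hoff with hm | hm
    · have hq : (if px = -1 then (0 : Int) else N - 1) = px + 1 := by
        rw [if_pos hm]; omega
      rw [hq] at hfree0
      have hruns := runs_exists N py (px + 1) hpy0 hpyN (by omega) (by omega) R C
      have hval := pac_off N py px py (px + 1) (runLo py R) (runHi N py R)
        (runLo (px + 1) C) (runHi N (px + 1) C) R C hruns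
        (Or.inr ⟨rfl, by omega, Or.inl (by omega)⟩) hpyR hpxC
      rw [hval, if_neg (by push_neg; exact ⟨hpyR, hfree0⟩)]
      obtain ⟨⟨a1, a2, _, _⟩, ⟨b1, _, _, _⟩, ⟨c1, c2, _, _⟩, ⟨d1, _, _, _⟩⟩ := hruns
      have h1 : 1 ≤ runHi N py R - runLo py R - 1 := by omega
      have h2 : 1 ≤ runHi N (px + 1) C - runLo (px + 1) C - 1 := by omega
      have := mul_le_mul h1 h2 (by omega) (by omega)
      omega
    · have hq : (if px = -1 then (0 : Int) else N - 1) = px - 1 := by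
        rw [if_neg (by omega)]; omega
      rw [hq] at hfree0
      have hruns := runs_exists N py (px - 1) hpy0 hpyN (by omega) (by omega) R C
      have hval := pac_off N py px py (px - 1) (runLo py R) (runHi N py R)
        (runLo (px - 1) C) (runHi N (px - 1) C) R C hruns
        (Or.inr ⟨rfl, by omega, Or.inr (by omega)⟩) hpyR hpxC
      rw [hval, if_neg (by push_neg; exact ⟨hpyR, hfree0⟩)]
      obtain ⟨⟨a1, a2, _, _⟩, ⟨b1, _, _, _⟩, ⟨c1, c2, _, _⟩, ⟨d1, _, _, _⟩⟩ := hruns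
      have h1 : 1 ≤ runHi N py R - runLo py R - 1 := by omega
      have h2 : 1 ≤ runHi N (px - 1) C - runLo (px - 1) C - 1 := by omega
      have := mul_le_mul h1 h2 (by omega) (by omega)
      omega
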